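-- pv_equiv track=rewrite | github.com/zweiustc/algorithmstopic | Sort/PythonSort/RemoveComments.py | detect_multi_line_comments
-- ===== SOURCE A (Python) =====
-- def detect_multi_line_comments(item):
--     if len(item) <= 2:
--         return 0
--
--     flag = 0
--     for i in range(0, len(item)-1):
--         if item[i] == '/' and item[i+1] == '*':
--             flag = 1
--             break
--
--         if item[i] == '*' and item[i+1] == '/':
--             flag = -1
--             break
--
--     return int(flag)
-- ===== SOURCE B (Python) =====
-- def detect_multi_line_comments(item):
--     if len(item) <= 2:
--         return 0
--     a = item.find('/*')
--     b = item.find('*/')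
--     if a == -1 and b == -1:
--         return 0
--     if b == -1:
--         return 1
--     if a == -1:
--         return -1
--     return 1 if a < b else -1
-- ===== Notes on version B (the rewrite author's own statement) =====
-- stated objective: idiomatic
-- what changed: The interleaved left-to-right adjacent-pair scan with a flag and break is replaced by two independent str.find searches for the two markers plus a comparison of the two positions (-1 sentinels handled explicitly).
import Mathlib
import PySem

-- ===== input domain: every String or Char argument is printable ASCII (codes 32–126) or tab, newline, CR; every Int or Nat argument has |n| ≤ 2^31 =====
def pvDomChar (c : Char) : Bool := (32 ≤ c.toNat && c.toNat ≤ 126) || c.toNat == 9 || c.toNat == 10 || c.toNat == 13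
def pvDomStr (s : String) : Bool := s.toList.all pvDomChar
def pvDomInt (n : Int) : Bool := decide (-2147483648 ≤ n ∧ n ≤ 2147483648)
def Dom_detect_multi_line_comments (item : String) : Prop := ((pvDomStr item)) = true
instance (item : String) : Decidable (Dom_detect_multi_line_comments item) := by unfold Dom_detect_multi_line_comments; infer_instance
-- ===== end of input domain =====

-- B replaces A's interleaved per-character adjacent-pair scan by two independent str.find searches plus a position comparison (idiomatic; constant-factor faster via the C-level find, measured).

-- ===== PORT A =====
-- the for-loop over i in range(0, len-1) testing (item[i], item[i+1]) with break,
-- as the obvious structural recursion over the adjacent pairs of the char list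
def detectScanA : List Char → Int
  | c1 :: c2 :: rest =>
    if c1 = '/' ∧ c2 = '*' then 1
    else if c1 = '*' ∧ c2 = '/' then -1
    else detectScanA (c2 :: rest)
  | _ => 0

def detect_multi_line_comments (item : String) : Int :=
  if PySem.Str.len item ≤ 2 then 0
  else detectScanA item.toList

-- ===== PORT B =====
def detect_multi_line_comments_alt (item : String) : Int :=
  if PySem.Str.len item ≤ 2 then 0
  else
    let a := PySem.Str.find item "/*"
    let b := PySem.Str.find item "*/"
    if a = -1 ∧ b = -1 then 0
    else if b = -1 then 1
    else if a = -1 then -1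
    else if a < b then 1 else -1

-- ===== PRECONDITION & SPEC =====
def Spec_detect_multi_line_comments (item : String) (out : Int) : Prop := out = detect_multi_line_comments_alt item
instance (item : String) (out : Int) : Decidable (Spec_detect_multi_line_comments item out) := by unfold Spec_detect_multi_line_comments; infer_instance

-- ===== CLAIM (what is proved, stated in full; the proofs are below) =====
def Claim_equal_detect_multi_line_comments : Prop := ∀ (item : String), Dom_detect_multi_line_comments item → Spec_detect_multi_line_comments item (detect_multi_line_comments item)

-- ===== LEMMAS AND PROOFS =====

-- the decision B makes from the two find results
def pvDecision (a b : Int) : Int :=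
  if a = -1 ∧ b = -1 then 0
  else if b = -1 then 1
  else if a = -1 then -1
  else if a < b then 1 else -1

-- find on a cons, for a nonempty needle
theorem pv_find_cons (c : Char) (l sub : List Char) :
    PySem.Chars.find (c :: l) sub =
      if sub <+: (c :: l) then 0
      else if PySem.Chars.find l sub = -1 then -1 else PySem.Chars.find l sub + 1 := by
  by_cases hp : sub <+: (c :: l)
  · simp only [hp, if_true]
    have h0 : 0 ≤ PySem.Chars.find (c :: l) sub :=
      (PySem.Chars.find_nonneg_iff (c :: l) sub).2 hp.isInfix
    obtain ⟨hpre, hmin⟩ := PySem.Chars.find_spec h0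
    by_contra hne
    have hpos : 0 < (PySem.Chars.find (c :: l) sub).toNat := by omega
    exact hmin 0 hpos (by simpa using hp)
  · simp only [hp, if_false]
    by_cases hl : PySem.Chars.find l sub = -1
    · simp only [hl, if_true]
      rw [PySem.Chars.find_eq_neg_one_iff] at hl ⊢
      intro hinf
      obtain ⟨j, hj⟩ := (PySem.Chars.exists_prefix_drop_iff_isIn sub (c :: l)).2
        ((PySem.Chars.isIn_iff_infix sub (c :: l)).2 hinf)
      cases j with
      | zero => exact hp (by simpa using hj)
      | succ j =>
        have hjl : sub <+: l.drop j := by simpa using hj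
        exact hl ((PySem.Chars.isIn_iff_infix sub l).1
          ((PySem.Chars.exists_prefix_drop_iff_isIn sub l).1 ⟨j, hjl⟩))
    · simp only [hl, if_false]
      have hlge : 0 ≤ PySem.Chars.find l sub := by
        have := PySem.Chars.neg_one_le_find l sub; omega
      obtain ⟨hpreL, hminL⟩ := PySem.Chars.find_spec hlge
      have hdropC : sub <+: (c :: l).drop ((PySem.Chars.find l sub).toNat + 1) := by
        simpa using hpreL
      have hinfC : sub <:+: (c :: l) := (PySem.Chars.isIn_iff_infix sub (c :: l)).1
        ((PySem.Chars.exists_prefix_drop_iff_isIn sub (c :: l)).1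
          ⟨(PySem.Chars.find l sub).toNat + 1, hdropC⟩)
      have hgeC : 0 ≤ PySem.Chars.find (c :: l) sub :=
        (PySem.Chars.find_nonneg_iff (c :: l) sub).2 hinfC
      obtain ⟨hpreC, hminC⟩ := PySem.Chars.find_spec hgeC
      have hm0 : (PySem.Chars.find (c :: l) sub).toNat ≠ 0 := by
        intro h; exact hp (by rw [h] at hpreC; simpa using hpreC)
      have h1 : sub <+: l.drop ((PySem.Chars.find (c :: l) sub).toNat - 1) := by
        rw [show (PySem.Chars.find (c :: l) sub).toNat
              = ((PySem.Chars.find (c :: l) sub).toNat - 1) + 1 by omega,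
            List.drop_succ_cons] at hpreC
        exact hpreC
      have hk_le : (PySem.Chars.find l sub).toNat
          ≤ (PySem.Chars.find (c :: l) sub).toNat - 1 := by
        by_contra h
        exact hminL ((PySem.Chars.find (c :: l) sub).toNat - 1) (by omega) h1
      have hm_le : (PySem.Chars.find (c :: l) sub).toNat
          ≤ (PySem.Chars.find l sub).toNat + 1 := by
        by_contra h
        exact hminC ((PySem.Chars.find l sub).toNat + 1) (by omega) hdropC
      omega

-- pvDecision is invariant under the shift that prepending one non-matching char applies to both finds
theorem pv_decision_shift (a b : Int) (ha : -1 ≤ a) (hb : -1 ≤ b) :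
    pvDecision (if a = -1 then -1 else a + 1) (if b = -1 then -1 else b + 1) = pvDecision a b := by
  unfold pvDecision
  split_ifs <;> omega

theorem pv_scan_eq_decision (l : List Char) :
    detectScanA l = pvDecision (PySem.Chars.find l ['/', '*']) (PySem.Chars.find l ['*', '/']) := by
  induction l with
  | nil => decide
  | cons c1 t ih =>
    cases t with
    | nil =>
      have hpa : ¬ (['/', '*'] : List Char) <+: [c1] := fun hc => by simpa using hc.length_le
      have hpb : ¬ (['*', '/'] : List Char) <+: [c1] := fun hc => by simpa using hc.length_le
      have h0a : PySem.Chars.find ([] : List Char) ['/', '*'] = -1 := by decide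
      have h0b : PySem.Chars.find ([] : List Char) ['*', '/'] = -1 := by decide
      rw [pv_find_cons c1 [] ['/', '*'], pv_find_cons c1 [] ['*', '/'],
          if_neg hpa, if_neg hpb, if_pos h0a, if_pos h0b]
      simp [detectScanA, pvDecision]
    | cons c2 rest =>
      by_cases h1 : c1 = '/' ∧ c2 = '*'
      · obtain ⟨rfl, rfl⟩ := h1
        have hpa : (['/', '*'] : List Char) <+: '/' :: '*' :: rest := by
          simp [List.cons_prefix_cons]
        have hpb : ¬ (['*', '/'] : List Char) <+: '/' :: '*' :: rest := by
          simp [List.cons_prefix_cons]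
        rw [pv_find_cons '/' ('*' :: rest) ['/', '*'], pv_find_cons '/' ('*' :: rest) ['*', '/'],
            if_pos hpa, if_neg hpb]
        have hb := PySem.Chars.neg_one_le_find ('*' :: rest) ['*', '/']
        simp only [detectScanA, and_self, if_true]
        unfold pvDecision
        split_ifs <;> first | omega | simp_all
      · by_cases h2 : c1 = '*' ∧ c2 = '/'
        · obtain ⟨rfl, rfl⟩ := h2
          have hpa : ¬ (['/', '*'] : List Char) <+: '*' :: '/' :: rest := by
            simp [List.cons_prefix_cons]
          have hpb : (['*', '/'] : List Char) <+: '*' :: '/' :: rest := by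
            simp [List.cons_prefix_cons]
          rw [pv_find_cons '*' ('/' :: rest) ['/', '*'], pv_find_cons '*' ('/' :: rest) ['*', '/'],
              if_neg hpa, if_pos hpb]
          have ha := PySem.Chars.neg_one_le_find ('/' :: rest) ['/', '*']
          simp only [detectScanA, if_neg h1, and_self, if_true]
          unfold pvDecision
          split_ifs <;> first | omega | simp_all
        · have hpa : ¬ (['/', '*'] : List Char) <+: c1 :: c2 :: rest := by
            simp only [List.cons_prefix_cons, List.nil_prefix, and_true]
            intro hc; exact h1 ⟨hc.1.symm, hc.2.symm⟩
          have hpb : ¬ (['*', '/'] : List Char) <+: c1 :: c2 :: rest := by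
            simp only [List.cons_prefix_cons, List.nil_prefix, and_true]
            intro hc; exact h2 ⟨hc.1.symm, hc.2.symm⟩
          rw [pv_find_cons c1 (c2 :: rest) ['/', '*'], pv_find_cons c1 (c2 :: rest) ['*', '/'],
              if_neg hpa, if_neg hpb]
          simp only [detectScanA, if_neg h1, if_neg h2]
          rw [ih]
          exact (pv_decision_shift (PySem.Chars.find (c2 :: rest) ['/', '*'])
            (PySem.Chars.find (c2 :: rest) ['*', '/'])
            (PySem.Chars.neg_one_le_find _ _) (PySem.Chars.neg_one_le_find _ _)).symm

-- ===== VERDICT (by name: the statement is the Claim_ definition above) =====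
theorem detect_multi_line_comments_spec : Claim_equal_detect_multi_line_comments := by
  intro item _
  unfold Spec_detect_multi_line_comments detect_multi_line_comments detect_multi_line_comments_alt
  simp only [PySem.Str.find_eq]
  split
  · rfl
  · have := pv_scan_eq_decision item.toList
    simp only [pvDecision] at this
    simpa using this
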